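-- pv_equiv track=rewrite | github.com/krcs/aoc-2021 | 03/day3_2.py | calc_co
-- ===== SOURCE A (Python) =====
-- def calc_co(rows, idx):
--     ones = [ 0 for n in range(len(rows[0]))]
--     zeros = [ 0 for n in range(len(rows[0]))]
--
--     for row in rows:
--         if row[idx] >= 1:
--             ones[idx] += 1
--         else:
--             zeros[idx] += 1
--
--     result = []
--
--     for row in rows:
--         if ones[idx]>=zeros[idx]:
--             if row[idx] == 0:
--                 result.append(row)
--         else:
--             if row[idx] == 1:
--                 result.append(row)
--     return result
-- ===== SOURCE B (Python) =====
-- def calc_co(rows, idx):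
--     ones = 0
--     rows0 = []
--     rows1 = []
--     for row in rows:
--         v = row[idx]
--         if v >= 1:
--             ones += 1
--         if v == 0:
--             rows0.append(row)
--         if v == 1:
--             rows1.append(row)
--     return rows0 if ones >= len(rows) - ones else rows1
-- ===== Notes on version B (the rewrite author's own statement) =====
-- stated objective: simpler
-- what changed: single pass that counts rows with row[idx]>=1 and simultaneously collects the rows with row[idx]==0 and ==1, picking one collected list at the end, instead of A's per-column counter arrays followed by a second filtering pass over rows
import Mathlib
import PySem

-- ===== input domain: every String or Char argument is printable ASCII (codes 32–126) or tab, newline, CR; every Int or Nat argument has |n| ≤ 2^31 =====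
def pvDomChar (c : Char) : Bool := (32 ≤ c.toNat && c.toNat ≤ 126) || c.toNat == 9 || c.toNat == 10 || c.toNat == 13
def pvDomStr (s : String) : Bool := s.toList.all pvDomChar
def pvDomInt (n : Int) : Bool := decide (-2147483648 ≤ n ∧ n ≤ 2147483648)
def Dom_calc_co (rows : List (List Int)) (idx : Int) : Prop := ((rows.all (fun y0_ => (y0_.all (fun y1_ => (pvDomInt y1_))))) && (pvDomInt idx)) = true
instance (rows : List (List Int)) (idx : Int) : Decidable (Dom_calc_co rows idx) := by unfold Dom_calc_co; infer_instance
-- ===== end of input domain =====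

-- B replaces A's per-column counter arrays + second filtering pass by a single pass that
-- counts rows with row[idx] >= 1 and collects the ==0 and ==1 rows as it goes (simpler, one pass).


-- ===== PORT A =====
def calc_co (rows : List (List Int)) (idx : Int) : List (List Int) :=
  let n := (rows.headD []).length
  let oz : List Int × List Int :=
    rows.foldl (fun oz row =>
      if PySem.List.pyGetD row idx 0 ≥ 1 then
        (PySem.List.pySetD oz.1 idx (PySem.List.pyGetD oz.1 idx 0 + 1), oz.2)
      else
        (oz.1, PySem.List.pySetD oz.2 idx (PySem.List.pyGetD oz.2 idx 0 + 1)))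
      (List.replicate n 0, List.replicate n 0)
  rows.foldl (fun result row =>
    if PySem.List.pyGetD oz.1 idx 0 ≥ PySem.List.pyGetD oz.2 idx 0 then
      if PySem.List.pyGetD row idx 0 = 0 then result ++ [row] else result
    else
      if PySem.List.pyGetD row idx 0 = 1 then result ++ [row] else result) []

-- ===== PORT B =====
def calc_co_alt (rows : List (List Int)) (idx : Int) : List (List Int) :=
  let s : Int × List (List Int) × List (List Int) :=
    rows.foldl (fun s row =>
      let v := PySem.List.pyGetD row idx 0
      (if v ≥ 1 then s.1 + 1 else s.1,
       if v = 0 then s.2.1 ++ [row] else s.2.1,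
       if v = 1 then s.2.2 ++ [row] else s.2.2)) (0, [], [])
  if s.1 ≥ (rows.length : Int) - s.1 then s.2.1 else s.2.2

-- ===== PRECONDITION & SPEC =====
-- Pre_ excludes exactly the inputs on which A raises IndexError: rows == [] (rows[0]), or idx
-- out of Python range for some row (row[idx]; the counter lists share rows[0]'s length).
def Pre_calc_co (rows : List (List Int)) (idx : Int) : Prop :=
  rows ≠ [] ∧ ∀ row ∈ rows, PySem.Raise.InRange row.length idx
instance (rows : List (List Int)) (idx : Int) : Decidable (Pre_calc_co rows idx) := by
  unfold Pre_calc_co; infer_instance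
def pvWitness_calc_co : List (List Int) × Int := ([[1, 0], [0, 1], [1, 1]], 0)

def Spec_calc_co (rows : List (List Int)) (idx : Int) (out : List (List Int)) : Prop := out = calc_co_alt rows idx
instance (rows : List (List Int)) (idx : Int) (out : List (List Int)) : Decidable (Spec_calc_co rows idx out) := by unfold Spec_calc_co; infer_instance

-- ===== CLAIM (what is proved, stated in full; the proofs are below) =====
def Claim_equal_calc_co : Prop := ∀ (rows : List (List Int)) (idx : Int), Dom_calc_co rows idx → Pre_calc_co rows idx → Spec_calc_co rows idx (calc_co rows idx)

-- ===== LEMMAS AND PROOFS =====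

-- reading back the slot just written (general Python index, in range)
lemma getD_setD_self (xs : List Int) (i v : Int) (h : PySem.Raise.InRange xs.length i) :
    PySem.List.pyGetD (PySem.List.pySetD xs i v) i 0 = v := by
  obtain ⟨h1, h2⟩ := h
  by_cases hp : 0 ≤ i
  · have hk : i.toNat < xs.length := by omega
    simp only [PySem.List.pySetD, PySem.List.pySet?, PySem.List.pyGetD, PySem.List.pyGet?,
      PySem.List.pyIdx?]
    split_ifs <;> simp_all [List.length_set]
  · have hk : xs.length - (-i).toNat < xs.length := by omega
    simp only [PySem.List.pySetD, PySem.List.pySet?, PySem.List.pyGetD, PySem.List.pyGet?,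
      PySem.List.pyIdx?]
    split_ifs <;> simp_all [List.length_set, List.getElem_set_self]

lemma getD_replicate (n : Nat) (i : Int) (h : PySem.Raise.InRange n i) :
    PySem.List.pyGetD (List.replicate n (0 : Int)) i 0 = 0 := by
  obtain ⟨h1, h2⟩ := h
  have hk : n - (-i).toNat < n ∨ 0 ≤ i := by omega
  simp only [PySem.List.pyGetD, PySem.List.pyGet?, PySem.List.pyIdx?]
  split_ifs <;> simp_all [List.getElem?_replicate]

-- A's first loop: the idx slots of the two counter lists count the >=1 rows and the rest
lemma loopA (idx : Int) (rows : List (List Int)) :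
    ∀ (ones zeros : List Int),
      PySem.Raise.InRange ones.length idx → PySem.Raise.InRange zeros.length idx →
      PySem.List.pyGetD (rows.foldl (fun oz row =>
          if PySem.List.pyGetD row idx 0 ≥ 1 then
            (PySem.List.pySetD oz.1 idx (PySem.List.pyGetD oz.1 idx 0 + 1), oz.2)
          else
            (oz.1, PySem.List.pySetD oz.2 idx (PySem.List.pyGetD oz.2 idx 0 + 1)))
          (ones, zeros)).1 idx 0
        = PySem.List.pyGetD ones idx 0
            + (rows.countP (fun row => PySem.List.pyGetD row idx 0 ≥ 1) : Int)
      ∧ PySem.List.pyGetD (rows.foldl (fun oz row =>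
          if PySem.List.pyGetD row idx 0 ≥ 1 then
            (PySem.List.pySetD oz.1 idx (PySem.List.pyGetD oz.1 idx 0 + 1), oz.2)
          else
            (oz.1, PySem.List.pySetD oz.2 idx (PySem.List.pyGetD oz.2 idx 0 + 1)))
          (ones, zeros)).2 idx 0
        = PySem.List.pyGetD zeros idx 0
            + (rows.countP (fun row => ¬ PySem.List.pyGetD row idx 0 ≥ 1) : Int) := by
  induction rows with
  | nil => intro ones zeros h1 h2; simp
  | cons row rows ih =>
    intro ones zeros h1 h2
    by_cases hv : PySem.List.pyGetD row idx 0 ≥ 1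
    · have h1' : PySem.Raise.InRange
          (PySem.List.pySetD ones idx (PySem.List.pyGetD ones idx 0 + 1)).length idx := by
        rwa [PySem.List.length_pySetD]
      have hih := ih (PySem.List.pySetD ones idx (PySem.List.pyGetD ones idx 0 + 1)) zeros h1' h2
      simp only [List.foldl_cons]
      rw [if_pos hv]
      simp only [List.countP_cons]
      refine ⟨?_, ?_⟩
      · rw [hih.1, getD_setD_self ones idx _ h1]
        simp [hv]
        omega
      · rw [hih.2]
        simp [hv]
    · have h2' : PySem.Raise.InRange
          (PySem.List.pySetD zeros idx (PySem.List.pyGetD zeros idx 0 + 1)).length idx := by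
        rwa [PySem.List.length_pySetD]
      have hih := ih ones (PySem.List.pySetD zeros idx (PySem.List.pyGetD zeros idx 0 + 1)) h1 h2'
      simp only [List.foldl_cons]
      rw [if_neg hv]
      simp only [List.countP_cons]
      refine ⟨?_, ?_⟩
      · rw [hih.1]
        simp [hv]
      · rw [hih.2, getD_setD_self zeros idx _ h2]
        simp [hv]
        omega

-- B's single loop, unrolled
lemma loopB (idx : Int) (rows : List (List Int)) :
    ∀ (c : Int) (r0 r1 : List (List Int)),
      rows.foldl (fun s row =>
        let v := PySem.List.pyGetD row idx 0
        ((if v ≥ 1 then s.1 + 1 else s.1 : Int),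
         if v = 0 then s.2.1 ++ [row] else s.2.1,
         if v = 1 then s.2.2 ++ [row] else s.2.2)) (c, r0, r1)
      = (c + (rows.countP (fun row => PySem.List.pyGetD row idx 0 ≥ 1) : Int),
         r0 ++ rows.filter (fun row => PySem.List.pyGetD row idx 0 = 0),
         r1 ++ rows.filter (fun row => PySem.List.pyGetD row idx 0 = 1)) := by
  induction rows with
  | nil => intro c r0 r1; simp
  | cons row rows ih =>
    intro c r0 r1
    simp only [List.foldl_cons]
    rw [ih, List.countP_cons, List.filter_cons, List.filter_cons]
    by_cases h1 : PySem.List.pyGetD row idx 0 ≥ 1 <;>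
    by_cases h0 : PySem.List.pyGetD row idx 0 = 0 <;>
    by_cases he : PySem.List.pyGetD row idx 0 = 1 <;>
      simp [h1, h0, he] <;> omega

theorem calc_co_spec : Claim_equal_calc_co := by
  intro rows idx _ hpre
  obtain ⟨hne, hall⟩ := hpre
  have hhd : (rows.headD []) ∈ rows := by
    cases rows with
    | nil => exact absurd rfl hne
    | cons r rs => exact List.mem_cons_self
  have hidx : PySem.Raise.InRange (rows.headD []).length idx := hall _ hhd
  have hrep : PySem.Raise.InRange (List.replicate (rows.headD []).length (0 : Int)).length idx := by
    simpa using hidx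
  unfold Spec_calc_co calc_co calc_co_alt
  simp only []
  have hA := loopA idx rows (List.replicate (rows.headD []).length 0)
    (List.replicate (rows.headD []).length 0) hrep hrep
  rw [getD_replicate _ _ hidx] at hA
  have hB := loopB idx rows 0 [] []
  rw [hB]
  simp only [hA.1, hA.2, zero_add]
  have hsum : rows.countP (fun row => PySem.List.pyGetD row idx 0 ≥ 1)
      + rows.countP (fun row => ¬ PySem.List.pyGetD row idx 0 ≥ 1) = rows.length := by
    simpa using (rows.length_eq_countP_add_countP (fun row => decide (PySem.List.pyGetD row idx 0 ≥ 1))).symm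
  by_cases hc : (rows.countP (fun row => PySem.List.pyGetD row idx 0 ≥ 1) : Int)
      ≥ (rows.countP (fun row => ¬ PySem.List.pyGetD row idx 0 ≥ 1) : Int)
  · simp only [if_pos hc, if_pos (show (rows.countP (fun row => PySem.List.pyGetD row idx 0 ≥ 1) : Int)
        ≥ (rows.length : Int) - (rows.countP (fun row => PySem.List.pyGetD row idx 0 ≥ 1) : Int) from by omega)]
    rw [PySem.List.foldl_append_ite_eq_filter]
  · simp only [if_neg hc, if_neg (show ¬ ((rows.countP (fun row => PySem.List.pyGetD row idx 0 ≥ 1) : Int)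
        ≥ (rows.length : Int) - (rows.countP (fun row => PySem.List.pyGetD row idx 0 ≥ 1) : Int)) from by omega)]
    rw [PySem.List.foldl_append_ite_eq_filter]
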